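-- pv_equiv track=rewrite | github.com/PurdueECE/action-foreach | action-foreach-runs/run-20220411_012959/PurdueECE364-prelabs-adrianchen8662/Prelab08/src/programs.py | getStreakProduct
-- ===== SOURCE A (Python) =====
-- def getStreakProduct(sequence, maxSize, product):
--     # generate empty arrays
--     arr = [1]
--     arr.remove(1)
--     arrtest = [1]
--     arrtest.remove(1)
--
--     # convert sequence to array of ints
--     intarr = [int(x) for x in str(sequence)]
--
--     # generate combinations of sequential numbers with lengths less than or equal to maxSize
--     for i in range(1,maxSize+1):
--         for r in range(len(intarr)-i+1):
--             arrpart = intarr[r:r+i]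
--             arrtest.append(arrpart)
--
--     # multiply subarrays and compare
--     for i in arrtest:
--         prod = 1
--         for x in i:
--             prod *= x
--         if prod == product:
--             arr.append(int("".join([str(integer) for integer in i])))
--
--     return arr
-- ===== SOURCE B (Python) =====
-- def getStreakProduct(sequence, maxSize, product):
--     # incremental DP: extend each window's product and numeric value by one digit
--     # per length step, instead of re-slicing and re-multiplying every window
--     digits = [int(c) for c in str(sequence)]
--     n = len(digits)
--     out = []
--     prods = [1] * n
--     vals = [0] * n
--     for i in range(1, min(maxSize, n) + 1):
--         for r in range(n - i + 1):
--             d = digits[r + i - 1]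
--             prods[r] *= d
--             vals[r] = vals[r] * 10 + d
--             if prods[r] == product:
--                 out.append(vals[r])
--     return out
-- ===== Notes on version B (the rewrite author's own statement) =====
-- stated objective: faster
-- what changed: B replaces A's materialize-all-windows-then-re-multiply scheme (a slice, a product loop and a str-join-int conversion per window, plus maxSize outer iterations even past the digit count) by a single incremental DP pass that caps the length loop at min(maxSize, #digits) and extends each window's product and numeric value by one digit per step.
import Mathlib
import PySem

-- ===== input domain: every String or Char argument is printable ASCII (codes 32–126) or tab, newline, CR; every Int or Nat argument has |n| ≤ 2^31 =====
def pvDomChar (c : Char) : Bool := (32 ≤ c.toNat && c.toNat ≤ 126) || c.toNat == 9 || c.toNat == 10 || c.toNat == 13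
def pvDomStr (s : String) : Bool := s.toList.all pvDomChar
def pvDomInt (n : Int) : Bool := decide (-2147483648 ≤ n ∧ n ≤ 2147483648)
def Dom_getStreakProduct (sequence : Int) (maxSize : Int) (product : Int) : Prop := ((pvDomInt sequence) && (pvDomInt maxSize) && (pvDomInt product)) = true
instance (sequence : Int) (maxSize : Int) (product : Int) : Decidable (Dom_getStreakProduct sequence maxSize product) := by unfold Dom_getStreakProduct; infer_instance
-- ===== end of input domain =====

-- B replaces A's re-slicing/re-multiplying of every window by one incremental DP pass
-- (per length step each window's product and numeric value are extended by one digit),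
-- and stops at length min(maxSize, number of digits): objective 'faster'.

-- ===== PORT A =====
-- int(x) on a digit string is ported by hand as decimal parsing over the chars;
-- exact for the strings that occur here (nonempty runs of '0'..'9'; Pre_ excludes the '-' sign).
def pvParseDigits (cs : List Char) : Int :=
  cs.foldl (fun a c => a * 10 + ((c.toNat : Int) - 48)) 0

def getStreakProduct (sequence : Int) (maxSize : Int) (product : Int) : List Int :=
  -- arr = []; arrtest = []  (each built as [1] then 1 removed: empty)
  -- intarr = [int(x) for x in str(sequence)]  (int(x) on one char: hand-ported, exact for '0'..'9')
  let intarr : List Int :=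
    (PySem.Int.toChars sequence).map (fun c => ((c.toNat : Int) - 48))
  -- for i in range(1, maxSize+1): for r in range(len(intarr)-i+1): arrtest.append(intarr[r:r+i])
  let arrtest : List (List Int) :=
    (PySem.List.pyRange 1 (maxSize + 1) 1).foldl
      (fun acc i =>
        (PySem.List.pyRange 0 ((intarr.length : Int) - i + 1) 1).foldl
          (fun acc2 r => acc2 ++ [PySem.List.slice intarr (some r) (some (r + i))])
          acc)
      []
  -- for i in arrtest: prod = 1; (for x in i: prod *= x); if prod == product: arr.append(int("".join([str(integer) for integer in i])))
  arrtest.foldl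
    (fun arr l =>
      let prod := l.foldl (fun p x => p * x) 1
      if prod = product then
        arr ++ [pvParseDigits (PySem.Chars.join [] (l.map (fun integer => PySem.Int.toChars integer)))]
      else arr)
    []

-- ===== PORT B =====
def getStreakProduct_alt (sequence : Int) (maxSize : Int) (product : Int) : List Int :=
  -- digits = [int(c) for c in str(sequence)]  (int on one char: hand-ported, exact for '0'..'9')
  let digits : List Int :=
    (PySem.Int.toChars sequence).map (fun c => ((c.toNat : Int) - 48))
  let n : Int := (digits.length : Int)
  -- state (out, prods, vals); for i in range(1, min(maxSize, n)+1): for r in range(n-i+1): …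
  let st :=
    (PySem.List.pyRange 1 (min maxSize n + 1) 1).foldl
      (fun st i =>
        (PySem.List.pyRange 0 (n - i + 1) 1).foldl
          (fun st2 r =>
            let d := PySem.List.pyGetD digits (r + i - 1) 0
            let p := PySem.List.pyGetD st2.2.1 r 0 * d
            let v := PySem.List.pyGetD st2.2.2 r 0 * 10 + d
            (if p = product then st2.1 ++ [v] else st2.1,
             PySem.List.pySetD st2.2.1 r p,
             PySem.List.pySetD st2.2.2 r v))
          st)
      (([] : List Int), List.replicate digits.length (1 : Int), List.replicate digits.length (0 : Int))
  st.1

-- ===== PRECONDITION & SPEC =====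
-- Pre_ excludes sequence < 0: there str(sequence) starts with '-' and A raises ValueError at int('-').
def Pre_getStreakProduct (sequence : Int) (maxSize : Int) (product : Int) : Prop := 0 ≤ sequence
instance (sequence : Int) (maxSize : Int) (product : Int) : Decidable (Pre_getStreakProduct sequence maxSize product) := by unfold Pre_getStreakProduct; infer_instance
def pvWitness_getStreakProduct : Int × Int × Int := (1234, 2, 12)

def Spec_getStreakProduct (sequence : Int) (maxSize : Int) (product : Int) (out : List Int) : Prop := out = getStreakProduct_alt sequence maxSize product
instance (sequence : Int) (maxSize : Int) (product : Int) (out : List Int) : Decidable (Spec_getStreakProduct sequence maxSize product out) := by unfold Spec_getStreakProduct; infer_instance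

-- ===== CLAIM (what is proved, stated in full; the proofs are below) =====
def Claim_equal_getStreakProduct : Prop := ∀ (sequence : Int) (maxSize : Int) (product : Int), Dom_getStreakProduct sequence maxSize product → Pre_getStreakProduct sequence maxSize product → Spec_getStreakProduct sequence maxSize product (getStreakProduct sequence maxSize product)

-- ===== LEMMAS AND PROOFS =====

-- common abbreviations used only by the proofs
def pvDigits (s : Int) : List Int := (PySem.Int.toChars s).map (fun c => ((c.toNat : Int) - 48))
def pvProd (l : List Int) : Int := l.foldl (fun p x => p * x) 1
def pvNum (l : List Int) : Int := l.foldl (fun a d => a * 10 + d) 0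
def pvWin (ds : List Int) (r i : Nat) : List Int := (ds.drop r).take i
def pvHit (ds : List Int) (product : Int) (i r : Nat) : List Int :=
  if pvProd (pvWin ds r i) = product then [pvNum (pvWin ds r i)] else []
def pvHitsUpTo (ds : List Int) (product : Int) (i m : Nat) : List Int :=
  (List.range m).flatMap (pvHit ds product i)
def pvAll (ds : List Int) (product : Int) (L : Nat) : List Int :=
  (List.range L).flatMap (fun k => pvHitsUpTo ds product (k + 1) (ds.length - (k + 1) + 1))

-- named copies of the two loop bodies (definitionally equal to the ports' lambdas)
def pvABody (p : Int) (arr : List Int) (l : List Int) : List Int :=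
  let prod := l.foldl (fun p x => p * x) 1
  if prod = p then
    arr ++ [pvParseDigits (PySem.Chars.join [] (l.map (fun integer => PySem.Int.toChars integer)))]
  else arr

def pvATest (ds : List Int) (m : Int) : List (List Int) :=
  (PySem.List.pyRange 1 (m + 1) 1).foldl
    (fun acc i =>
      (PySem.List.pyRange 0 ((ds.length : Int) - i + 1) 1).foldl
        (fun acc2 r => acc2 ++ [PySem.List.slice ds (some r) (some (r + i))])
        acc)
    []

def pvInner (ds : List Int) (p : Int) (i : Int)
    (st2 : List Int × List Int × List Int) (r : Int) : List Int × List Int × List Int :=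
  let d := PySem.List.pyGetD ds (r + i - 1) 0
  let pr := PySem.List.pyGetD st2.2.1 r 0 * d
  let v := PySem.List.pyGetD st2.2.2 r 0 * 10 + d
  (if pr = p then st2.1 ++ [v] else st2.1,
   PySem.List.pySetD st2.2.1 r pr,
   PySem.List.pySetD st2.2.2 r v)

def pvOuter (ds : List Int) (p : Int)
    (st : List Int × List Int × List Int) (i : Int) : List Int × List Int × List Int :=
  (PySem.List.pyRange 0 ((ds.length : Int) - i + 1) 1).foldl (pvInner ds p i) st

lemma pv_a_eq (s m p : Int) :
    getStreakProduct s m p = (pvATest (pvDigits s) m).foldl (pvABody p) [] := rfl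

lemma pv_alt_eq (s m p : Int) :
    getStreakProduct_alt s m p
      = ((PySem.List.pyRange 1 (min m ((pvDigits s).length : Int) + 1) 1).foldl
          (pvOuter (pvDigits s) p)
          ([], List.replicate (pvDigits s).length 1, List.replicate (pvDigits s).length 0)).1 := rfl

-- every char of the decimal representation of a nonnegative int is '0'..'9'
lemma pv_toDigitsCore_mem (fuel : Nat) : ∀ (n : Nat) (acc : List Char) (c : Char),
    c ∈ Nat.toDigitsCore 10 fuel n acc → c ∈ acc ∨ (48 ≤ c.toNat ∧ c.toNat ≤ 57) := by
  induction fuel with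
  | zero => intro n acc c h; simp [Nat.toDigitsCore] at h; exact Or.inl h
  | succ f ih =>
    intro n acc c h
    rw [Nat.toDigitsCore] at h
    have hdig : 48 ≤ (Nat.digitChar (n % 10)).toNat ∧ (Nat.digitChar (n % 10)).toNat ≤ 57 := by
      have hlt : n % 10 < 10 := by omega
      interval_cases h : n % 10 <;> decide
    by_cases hz : n / 10 = 0
    · simp only [hz] at h
      rcases List.mem_cons.1 h with h | h
      · exact Or.inr (h ▸ hdig)
      · exact Or.inl h
    · simp only [if_neg hz] at h
      rcases ih _ _ _ h with h | h
      · rcases List.mem_cons.1 h with h | h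
        · exact Or.inr (h ▸ hdig)
        · exact Or.inl h
      · exact Or.inr h

lemma pv_digits_mem {s d : Int} (hs : 0 ≤ s) (hd : d ∈ pvDigits s) : 0 ≤ d ∧ d < 10 := by
  simp only [pvDigits, List.mem_map] at hd
  obtain ⟨c, hc, rfl⟩ := hd
  have hneg : ¬ s < 0 := by omega
  simp only [PySem.Int.toChars, if_neg hneg, Nat.toDigits] at hc
  rcases pv_toDigitsCore_mem _ _ _ _ hc with h | h
  · simp at h
  · omega

-- str(d) for a single digit d, and its round trip
def pvCharOf (d : Int) : Char := Char.ofNat (48 + d.toNat)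

lemma pv_toChars_small {d : Int} (h0 : 0 ≤ d) (h9 : d < 10) :
    PySem.Int.toChars d = [pvCharOf d] ∧ ((pvCharOf d).toNat : Int) - 48 = d := by
  interval_cases d <;> exact ⟨by decide, by decide⟩

-- int("".join([str(d) for d in l])) agrees with the decimal value of a digit list
lemma pv_valOf_eq {l : List Int} (h : ∀ d ∈ l, 0 ≤ d ∧ d < 10) :
    pvParseDigits (PySem.Chars.join [] (l.map (fun integer => PySem.Int.toChars integer))) = pvNum l := by
  have hmap : l.map (fun integer => PySem.Int.toChars integer)
      = (l.map pvCharOf).map (fun c => [c]) := by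
    rw [List.map_map]
    exact List.map_congr_left (fun d hd => (pv_toChars_small (h d hd).1 (h d hd).2).1)
  rw [hmap, PySem.Chars.join_nil_singletons, pvParseDigits, List.foldl_map]
  exact PySem.List.foldl_congr_mem _ _ _ _ (by
    intro acc x hx
    rw [(pv_toChars_small (h x hx).1 (h x hx).2).2])

-- the Prop-ite fold of A's second loop, as a flatMap
lemma pv_foldl_if {α β : Type} (P : α → Prop) [DecidablePred P] (f : α → β) (l : List α) (acc : List β) :
    l.foldl (fun a x => if P x then a ++ [f x] else a) acc
      = acc ++ l.flatMap (fun x => if P x then [f x] else []) := by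
  induction l generalizing acc with
  | nil => simp
  | cons x xs ih =>
    simp only [List.foldl_cons, List.flatMap_cons, ih]
    split_ifs <;> simp

lemma pvProd_append (l : List Int) (x : Int) : pvProd (l ++ [x]) = pvProd l * x := by
  simp [pvProd]

lemma pvNum_append (l : List Int) (x : Int) : pvNum (l ++ [x]) = pvNum l * 10 + x := by
  simp [pvNum]

lemma pvWin_succ {ds : List Int} {r i : Nat} (h : r + i < ds.length) :
    pvWin ds r (i + 1) = pvWin ds r i ++ [ds[r + i]] := by
  have hg : (ds.drop r)[i]? = some ds[r + i] := by
    rw [List.getElem?_drop, List.getElem?_eq_getElem h]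
  simp [pvWin, List.take_succ, hg]

lemma pvHitsUpTo_succ (ds : List Int) (p : Int) (i m : Nat) :
    pvHitsUpTo ds p i (m + 1) = pvHitsUpTo ds p i m ++ pvHit ds p i m := by
  simp [pvHitsUpTo, List.range_succ]

lemma pvAll_succ (ds : List Int) (p : Int) (L : Nat) :
    pvAll ds p (L + 1) = pvAll ds p L ++ pvHitsUpTo ds p (L + 1) (ds.length - (L + 1) + 1) := by
  simp [pvAll, List.range_succ]

-- ===== A-side normal form =====

lemma pv_inner_eq (ds : List Int) (p : Int) (i : Nat) (h1 : 1 ≤ i) (hin : i ≤ ds.length)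
    (hd : ∀ d ∈ ds, 0 ≤ d ∧ d < 10) :
    (PySem.List.pyRange 0 ((ds.length : Int) - (i : Int) + 1) 1).flatMap
        (fun r =>
          if pvProd (PySem.List.slice ds (some r) (some (r + (i : Int)))) = p then
            [pvParseDigits (PySem.Chars.join []
              ((PySem.List.slice ds (some r) (some (r + (i : Int)))).map
                (fun integer => PySem.Int.toChars integer)))]
          else [])
      = pvHitsUpTo ds p i (ds.length - i + 1) := by
  have hcast : (ds.length : Int) - (i : Int) + 1 = ((ds.length - i + 1 : Nat) : Int) := by
    omega
  rw [hcast, PySem.List.pyRange_one, List.flatMap_map]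
  simp only [Int.sub_zero, Int.toNat_natCast]
  apply List.flatMap_congr
  intro r hr
  have hrm : r < ds.length - i + 1 := List.mem_range.1 hr
  have hslice : PySem.List.slice ds (some ((0 : Int) + (r : Int))) (some ((0 : Int) + (r : Int) + (i : Int)))
      = pvWin ds r i := by
    rw [show ((0 : Int) + (r : Int)) = ((r : Nat) : Int) by push_cast; ring]
    rw [show ((r : Nat) : Int) + (i : Int) = ((r : Nat) : Int) + ((i : Nat) : Int) from rfl]
    rw [PySem.List.slice_natCast_add]
    rfl
  rw [hslice, pvHit]
  by_cases hp : pvProd (pvWin ds r i) = p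
  · rw [if_pos hp, if_pos hp]
    have hval := pv_valOf_eq (l := pvWin ds r i) (fun d hdm => hd d (by
      rw [pvWin] at hdm
      exact List.mem_of_mem_drop (List.mem_of_mem_take hdm)))
    rw [hval]
  · rw [if_neg hp, if_neg hp]

lemma pv_A_norm (s m p : Int) (hs : 0 ≤ s) :
    getStreakProduct s m p
      = pvAll (pvDigits s) p (min m ((pvDigits s).length : Int)).toNat := by
  set ds := pvDigits s with hds
  have hd : ∀ d ∈ ds, 0 ≤ d ∧ d < 10 := fun d hdm => pv_digits_mem hs hdm
  rw [pv_a_eq]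
  -- second loop as flatMap
  have hbody : ∀ (acc : List Int) (ts : List (List Int)),
      ts.foldl (pvABody p) acc
        = acc ++ ts.flatMap (fun l =>
            if pvProd l = p then
              [pvParseDigits (PySem.Chars.join [] (l.map (fun integer => PySem.Int.toChars integer)))]
            else []) := by
    intro acc ts
    have h := pv_foldl_if (fun l : List Int => pvProd l = p)
      (fun l => pvParseDigits (PySem.Chars.join [] (l.map (fun integer => PySem.Int.toChars integer)))) ts acc
    rw [← h]
    rfl
  -- arrtest as flatMap of slices
  have htest : pvATest ds m
      = (PySem.List.pyRange 1 (m + 1) 1).flatMap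
          (fun i => (PySem.List.pyRange 0 ((ds.length : Int) - i + 1) 1).map
            (fun r => PySem.List.slice ds (some r) (some (r + i)))) := by
    rw [pvATest]
    have hstep : ∀ (acc : List (List Int)) (i : Int),
        (PySem.List.pyRange 0 ((ds.length : Int) - i + 1) 1).foldl
          (fun acc2 r => acc2 ++ [PySem.List.slice ds (some r) (some (r + i))]) acc
        = acc ++ (PySem.List.pyRange 0 ((ds.length : Int) - i + 1) 1).map
            (fun r => PySem.List.slice ds (some r) (some (r + i))) := by
      intro acc i
      exact PySem.List.foldl_append_singleton_eq_map _ _ _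
    rw [PySem.List.foldl_congr_mem _ _
          (fun acc i => acc ++ (PySem.List.pyRange 0 ((ds.length : Int) - i + 1) 1).map
            (fun r => PySem.List.slice ds (some r) (some (r + i)))) _
          (fun acc i _ => hstep acc i),
        PySem.List.foldl_append_eq_flatMap]
    rfl
  rw [hbody, htest, List.nil_append, List.flatMap_assoc]
  -- truncate the outer range at l := min m n and finish
  by_cases hm0 : m ≤ 0
  · rw [PySem.List.pyRange_one_eq_nil (by omega)]
    rw [show (min m ((ds.length : Int))).toNat = 0 by omega]
    rfl
  · push_neg at hm0
    set l : Int := min m ((ds.length : Int)) with hl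
    have hl0 : 0 ≤ l := by omega
    have hlm : l ≤ m := by omega
    rw [PySem.List.pyRange_one_append 1 (l + 1) (m + 1) (by omega) (by omega),
        List.flatMap_append]
    have htail : (PySem.List.pyRange (l + 1) (m + 1) 1).flatMap
        (fun i => ((PySem.List.pyRange 0 ((ds.length : Int) - i + 1) 1).map
            (fun r => PySem.List.slice ds (some r) (some (r + i)))).flatMap
          (fun x => if pvProd x = p then
              [pvParseDigits (PySem.Chars.join [] (x.map (fun integer => PySem.Int.toChars integer)))]
            else [])) = [] := by
      apply List.flatMap_eq_nil_iff.2
      intro i hi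
      rw [PySem.List.mem_pyRange_one] at hi
      rw [PySem.List.pyRange_one_eq_nil (by omega)]
      rfl
    rw [htail, List.append_nil, PySem.List.pyRange_one]
    rw [show ((l + 1) - 1).toNat = l.toNat by omega, List.flatMap_map]
    apply List.flatMap_congr
    intro k hk
    have hkl : k < l.toNat := List.mem_range.1 hk
    rw [show (1 : Int) + (k : Int) = ((k + 1 : Nat) : Int) by push_cast; ring, List.flatMap_map]
    have hmain := pv_inner_eq ds p (k + 1) (by omega) (by omega) hd
    rw [← hmain]

-- ===== B-side normal form =====

def pvPm (ds : List Int) (i m : Nat) : List Int :=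
  (List.range ds.length).map (fun r => pvProd ((ds.drop r).take (if r < m then i else i - 1)))
def pvVm (ds : List Int) (i m : Nat) : List Int :=
  (List.range ds.length).map (fun r => pvNum ((ds.drop r).take (if r < m then i else i - 1)))

-- updating slot m advances the mixed-state list by one position
lemma pv_map_set (f : List Int → Int) (ds : List Int) (i m : Nat) (hm : m < ds.length) :
    ((List.range ds.length).map (fun r => f ((ds.drop r).take (if r < m then i else i - 1)))).set m
        (f ((ds.drop m).take i))
      = (List.range ds.length).map (fun r => f ((ds.drop r).take (if r < m + 1 then i else i - 1))) := by
  apply List.ext_getElem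
  · simp
  · intro j hj hj2
    rw [List.getElem_set]
    simp only [List.getElem_map, List.getElem_range]
    by_cases hjm : m = j
    · subst hjm
      simp
    · rw [if_neg hjm]
      have hiff : (j < m + 1) ↔ (j < m) := by omega
      simp only [hiff]

-- after a full pass at length i the mixed state is the initial state for length i+1
lemma pv_map_last (f : List Int → Int) (ds : List Int) (i : Nat) (h1 : 1 ≤ i) :
    (List.range ds.length).map
        (fun r => f ((ds.drop r).take (if r < ds.length - i + 1 then i else i - 1)))
      = (List.range ds.length).map (fun r => f ((ds.drop r).take (if r < 0 then i + 1 else (i + 1) - 1))) := by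
  apply List.map_congr_left
  intro r hr
  have hrn : r < ds.length := List.mem_range.1 hr
  by_cases h : r < ds.length - i + 1
  · simp [h]
  · rw [if_neg h, if_neg (by omega : ¬ (r < 0))]
    have hlen : (ds.drop r).length ≤ i - 1 := by
      rw [List.length_drop]
      omega
    rw [List.take_of_length_le hlen, List.take_of_length_le (le_trans hlen (by omega))]

lemma pv_B_inner (ds : List Int) (p : Int) (i : Nat) (h1 : 1 ≤ i) (hin : i ≤ ds.length)
    (out : List Int) :
    ∀ (m : Nat), m ≤ ds.length - i + 1 →
      (PySem.List.pyRange 0 ((m : Nat) : Int) 1).foldl (pvInner ds p (i : Int))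
          (out, pvPm ds i 0, pvVm ds i 0)
        = (out ++ pvHitsUpTo ds p i m, pvPm ds i m, pvVm ds i m) := by
  intro m
  induction m with
  | zero =>
    intro _
    rw [show ((0 : Nat) : Int) = 0 from rfl, PySem.List.pyRange_one_eq_nil le_rfl]
    simp [pvHitsUpTo]
  | succ m ih =>
    intro hm
    have hm' : m ≤ ds.length - i + 1 := by omega
    have hmn : m < ds.length := by omega
    have hidx : m + (i - 1) < ds.length := by omega
    rw [show ((m + 1 : Nat) : Int) = (m : Int) + 1 by push_cast; ring,
        PySem.List.pyRange_one_succ_right (by positivity), List.foldl_append, ih hm']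
    show pvInner ds p (i : Int) _ (m : Int) = _
    rw [pvInner]
    have hd : PySem.List.pyGetD ds ((m : Int) + (i : Int) - 1) 0 = ds[m + (i - 1)] := by
      rw [show (m : Int) + (i : Int) - 1 = ((m + (i - 1) : Nat) : Int) by omega,
          PySem.List.pyGetD_natCast, List.getD_eq_getElem ds 0 hidx]
    have hwin : pvWin ds m i = (ds.drop m).take (i - 1) ++ [ds[m + (i - 1)]] := by
      have hw := pvWin_succ (ds := ds) (r := m) (i := i - 1) hidx
      rw [show i - 1 + 1 = i by omega] at hw
      exact hw
    have hpr : PySem.List.pyGetD (pvPm ds i m) (m : Int) 0 * ds[m + (i - 1)]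
        = pvProd (pvWin ds m i) := by
      rw [pvPm, PySem.List.pyGetD_natCast, List.getD_eq_getElem?_getD, List.getElem?_map,
          List.getElem?_range hmn]
      simp only [Option.map_some, Option.getD_some, if_neg (lt_irrefl m)]
      rw [hwin, pvProd_append]
    have hv : PySem.List.pyGetD (pvVm ds i m) (m : Int) 0 * 10 + ds[m + (i - 1)]
        = pvNum (pvWin ds m i) := by
      rw [pvVm, PySem.List.pyGetD_natCast, List.getD_eq_getElem?_getD, List.getElem?_map,
          List.getElem?_range hmn]
      simp only [Option.map_some, Option.getD_some, if_neg (lt_irrefl m)]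
      rw [hwin, pvNum_append]
    simp only [hd, hpr, hv]
    have hsetP : PySem.List.pySetD (pvPm ds i m) (m : Int) (pvProd (pvWin ds m i))
        = pvPm ds i (m + 1) := by
      rw [PySem.List.pySetD_natCast, pvPm, pvPm, pvWin, pv_map_set pvProd ds i m hmn]
    have hsetV : PySem.List.pySetD (pvVm ds i m) (m : Int) (pvNum (pvWin ds m i))
        = pvVm ds i (m + 1) := by
      rw [PySem.List.pySetD_natCast, pvVm, pvVm, pvWin, pv_map_set pvNum ds i m hmn]
    rw [hsetP, hsetV, pvHitsUpTo_succ, pvHit]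
    by_cases hp : pvProd (pvWin ds m i) = p
    · rw [if_pos hp, if_pos hp]
      simp
    · rw [if_neg hp, if_neg hp]
      simp

lemma pv_Pm_last (ds : List Int) (i : Nat) (h1 : 1 ≤ i) :
    pvPm ds i (ds.length - i + 1) = pvPm ds (i + 1) 0 := by
  rw [pvPm, pvPm, pv_map_last pvProd ds i h1]

lemma pv_Vm_last (ds : List Int) (i : Nat) (h1 : 1 ≤ i) :
    pvVm ds i (ds.length - i + 1) = pvVm ds (i + 1) 0 := by
  rw [pvVm, pvVm, pv_map_last pvNum ds i h1]

lemma pv_B_outer (ds : List Int) (p : Int) :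
    ∀ (L : Nat), L ≤ ds.length →
      (PySem.List.pyRange 1 ((L : Int) + 1) 1).foldl (pvOuter ds p)
          ([], pvPm ds 1 0, pvVm ds 1 0)
        = (pvAll ds p L, pvPm ds (L + 1) 0, pvVm ds (L + 1) 0) := by
  intro L
  induction L with
  | zero =>
    intro _
    rw [show ((0 : Nat) : Int) + 1 = 1 by ring, PySem.List.pyRange_one_eq_nil le_rfl]
    simp [pvAll]
  | succ L ih =>
    intro hL
    rw [show ((L + 1 : Nat) : Int) + 1 = ((L : Int) + 1) + 1 by push_cast; ring,
        PySem.List.pyRange_one_succ_right (by omega), List.foldl_append, ih (by omega)]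
    rw [List.foldl_cons, List.foldl_nil, pvOuter]
    rw [show (ds.length : Int) - ((L : Int) + 1) + 1 = ((ds.length - (L + 1) + 1 : Nat) : Int) by omega]
    rw [show (L : Int) + 1 = ((L + 1 : Nat) : Int) by push_cast; ring]
    rw [pv_B_inner ds p (L + 1) (by omega) hL _ _ le_rfl]
    rw [pvAll_succ, pv_Pm_last ds (L + 1) (by omega), pv_Vm_last ds (L + 1) (by omega)]

lemma pv_B_norm (s m p : Int) :
    getStreakProduct_alt s m p
      = pvAll (pvDigits s) p (min m ((pvDigits s).length : Int)).toNat := by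
  rw [pv_alt_eq]
  set ds := pvDigits s with hds
  have hrep1 : List.replicate ds.length (1 : Int) = pvPm ds 1 0 := by
    apply List.ext_getElem <;> simp [pvPm, pvProd]
  have hrep0 : List.replicate ds.length (0 : Int) = pvVm ds 1 0 := by
    apply List.ext_getElem <;> simp [pvVm, pvNum]
  by_cases hmin : min m ((ds.length : Int)) ≤ 0
  · rw [PySem.List.pyRange_one_eq_nil (by omega)]
    rw [show (min m ((ds.length : Int))).toNat = 0 by omega]
    rfl
  · rw [hrep1, hrep0,
        show min m ((ds.length : Int)) = (((min m ((ds.length : Int))).toNat : Nat) : Int) by omega,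
        pv_B_outer ds p _ (by omega)]
    rfl

-- ===== VERDICT (by name: the statement is the Claim_ definition above) =====
theorem getStreakProduct_spec : Claim_equal_getStreakProduct := by
  intro sequence maxSize product _ hpre
  unfold Spec_getStreakProduct
  rw [pv_A_norm sequence maxSize product hpre, pv_B_norm sequence maxSize product]
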